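-- pv_equiv track=rewrite | github.com/eglantinefonrose/RadioLiveALaCarte | @rd/0.segmentationProgrammesIntelligente/pythontest001/src/main.py | closest_duration
-- ===== SOURCE A (Python) =====
-- def closest_duration(timestamps, assumedDuration, startTime):
--     if not timestamps or len(timestamps) < 2:
--         return 0, 0  # Pas assez de timestamps pour faire une paire
--
--     timestamps.sort()  # Trier les timestamps
--     start_time = timestamps[0] + startTime  # Horaire de début présumé
--
--     best_t1, best_t2 = 0, 0
--     min_diff = float('inf')
--
--     for i in range(len(timestamps) - 1):
--         if timestamps[i] < start_time:
--             continue  # Ignorer les timestamps avant start_time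
--
--         for j in range(i + 1, len(timestamps)):
--             duration = timestamps[j] - timestamps[i]
--
--             if duration >= assumedDuration:
--                 diff = duration - assumedDuration
--                 if diff < min_diff:
--                     min_diff = diff
--                     best_t1, best_t2 = timestamps[i], timestamps[j]
--
--                 break  # Une fois qu'on a trouvé un écart valide, on arrête la boucle j
--
--     return (best_t1, best_t2) if best_t1 != 0 else (0, 0)
-- ===== SOURCE B (Python) =====
-- from bisect import bisect_left
--
-- def closest_duration(timestamps, assumedDuration, startTime):
--     # Note: unlike the original, this does not sort `timestamps` in place.
--     if len(timestamps) < 2: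
--         return 0, 0
--     ts = sorted(timestamps)
--     start_time = ts[0] + startTime
--     best_t1, best_t2 = 0, 0
--     min_diff = None
--     for i in range(len(ts) - 1):
--         if ts[i] < start_time:
--             continue
--         # first index >= i+1 whose value reaches ts[i] + assumedDuration
--         j = max(bisect_left(ts, ts[i] + assumedDuration), i + 1)
--         if j < len(ts):
--             diff = ts[j] - ts[i] - assumedDuration
--             if min_diff is None or diff < min_diff:
--                 min_diff = diff
--                 best_t1, best_t2 = ts[i], ts[j]
--     return (best_t1, best_t2) if best_t1 != 0 else (0, 0)
-- ===== Notes on version B (the rewrite author's own statement) =====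
-- stated objective: faster
-- what changed: The inner linear scan for the first later timestamp reaching the required gap is replaced by a single bisect_left binary search per outer index on the sorted list, turning the O(n^2) nested loops into O(n log n); B also sorts a copy instead of mutating the argument (return value unchanged).
import Mathlib
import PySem

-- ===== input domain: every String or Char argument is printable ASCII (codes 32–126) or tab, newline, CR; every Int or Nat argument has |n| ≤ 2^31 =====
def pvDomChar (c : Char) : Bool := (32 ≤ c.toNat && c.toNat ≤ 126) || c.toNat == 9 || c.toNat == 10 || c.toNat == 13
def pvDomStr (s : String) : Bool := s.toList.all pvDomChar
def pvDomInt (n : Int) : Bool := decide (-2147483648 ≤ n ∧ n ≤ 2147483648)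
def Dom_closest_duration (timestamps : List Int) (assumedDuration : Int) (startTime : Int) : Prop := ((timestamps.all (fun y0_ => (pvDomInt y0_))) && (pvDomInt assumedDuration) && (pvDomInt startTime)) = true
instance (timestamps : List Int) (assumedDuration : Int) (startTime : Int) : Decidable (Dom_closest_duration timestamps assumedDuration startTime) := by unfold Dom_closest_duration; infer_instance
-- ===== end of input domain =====

-- B replaces A's inner linear scan by one bisect_left binary search per outer index (objective: faster);
-- equivalence is about the RETURN value only: A sorts `timestamps` in place, B sorts a copy.

-- ===== PORT A =====
-- inner `for j in range(i+1, len(timestamps))` loop with its break, state = (best_t1, best_t2, min_diff);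
-- min_diff : Option Int, none = float('inf')
def pvLoopJ_A (ts : List Int) (d : Int) (ti : Int)
    (st : Int × Int × Option Int) : List Int → Int × Int × Option Int
  | [] => st
  | j :: rest =>
    let tj := PySem.List.pyGetD ts j 0
    let duration := tj - ti
    if d ≤ duration then
      let diff := duration - d
      -- `diff < float('inf')` is always true
      if (match st.2.2 with | none => true | some m => decide (diff < m)) then
        (ti, tj, some diff)
      else st
    else pvLoopJ_A ts d ti st rest

-- body of the outer `for i in range(len(timestamps) - 1)` loop
def pvStepA (ts : List Int) (d : Int) (start_time : Int)
    (st : Int × Int × Option Int) (i : Int) : Int × Int × Option Int :=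
  let ti := PySem.List.pyGetD ts i 0
  if ti < start_time then st
  else pvLoopJ_A ts d ti st (PySem.List.pyRange (i + 1) (ts.length : Int) 1)

def closest_duration (timestamps : List Int) (assumedDuration : Int) (startTime : Int) : Int × Int :=
  if timestamps.isEmpty || decide (timestamps.length < 2) then (0, 0)
  else
    let ts := PySem.List.sorted timestamps (fun x => x) false
    let start_time := PySem.List.pyGetD ts 0 0 + startTime
    let res := (PySem.List.pyRange 0 ((ts.length : Int) - 1) 1).foldl
      (pvStepA ts assumedDuration start_time) (0, 0, none)
    if res.1 ≠ 0 then (res.1, res.2.1) else (0, 0)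

-- ===== PORT B =====
-- body of B's `for i in range(len(ts) - 1)` loop: one bisect_left instead of the inner scan
def pvStepB (ts : List Int) (d : Int) (start_time : Int)
    (st : Int × Int × Option Int) (i : Nat) : Int × Int × Option Int :=
  let ti := ts.getD i 0
  if ti < start_time then st
  else
    let j := max (PySem.List.bisectLeft ts (ti + d)) (i + 1)
    if j < ts.length then
      let tj := ts.getD j 0
      let diff := tj - ti - d
      if (match st.2.2 with | none => true | some m => decide (diff < m)) then
        (ti, tj, some diff)
      else st
    else st

def closest_duration_alt (timestamps : List Int) (assumedDuration : Int) (startTime : Int) : Int × Int :=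
  if timestamps.length < 2 then (0, 0)
  else
    let ts := PySem.List.sorted timestamps (fun x => x) false
    let start_time := ts.getD 0 0 + startTime
    let res := (List.range (ts.length - 1)).foldl
      (pvStepB ts assumedDuration start_time) (0, 0, none)
    if res.1 ≠ 0 then (res.1, res.2.1) else (0, 0)

-- ===== PRECONDITION & SPEC =====
def Spec_closest_duration (timestamps : List Int) (assumedDuration : Int) (startTime : Int) (out : Int × Int) : Prop := out = closest_duration_alt timestamps assumedDuration startTime
instance (timestamps : List Int) (assumedDuration : Int) (startTime : Int) (out : Int × Int) : Decidable (Spec_closest_duration timestamps assumedDuration startTime out) := by unfold Spec_closest_duration; infer_instance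

-- ===== CLAIM (what is proved, stated in full; the proofs are below) =====
def Claim_equal_closest_duration : Prop := ∀ (timestamps : List Int) (assumedDuration : Int) (startTime : Int), Dom_closest_duration timestamps assumedDuration startTime → Spec_closest_duration timestamps assumedDuration startTime (closest_duration timestamps assumedDuration startTime)

-- ===== LEMMAS AND PROOFS =====

-- On a sorted list, A's inner scan starting at index a finds exactly the index
-- max (bisectLeft ts (ti+d)) a, the first index ≥ a whose value reaches ti + d.
theorem pvLoopJ_eq_bisect (ts : List Int) (hs : ts.Pairwise (· ≤ ·))
    (d ti : Int) (st : Int × Int × Option Int) (a : Nat) (ha : a ≤ ts.length) :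
    pvLoopJ_A ts d ti st (PySem.List.pyRange (a : Int) (ts.length : Int) 1) =
      (let j := max (PySem.List.bisectLeft ts (ti + d)) a
       if j < ts.length then
         let tj := ts.getD j 0
         let diff := tj - ti - d
         if (match st.2.2 with | none => true | some m => decide (diff < m)) then
           (ti, tj, some diff)
         else st
       else st) := by
  obtain ⟨hble, hlt, hge⟩ := PySem.List.bisectLeft_spec ts (ti + d) hs
  induction' hn : ts.length - a with k ih generalizing a
  · have haeq : a = ts.length := by omega
    rw [PySem.List.pyRange_one_eq_nil (by omega)]
    have hnlt : ¬ max (PySem.List.bisectLeft ts (ti + d)) a < ts.length := by omega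
    simp only [pvLoopJ_A, hnlt, if_false]
  · have halt : a < ts.length := by omega
    rw [PySem.List.pyRange_one_cons (by exact_mod_cast halt)]
    simp only [pvLoopJ_A]
    rw [PySem.List.pyGetD_natCast]
    by_cases hcond : d ≤ ts.getD a 0 - ti
    · have hgetc : ts.getD a 0 = ts[a] := List.getD_eq_getElem ts 0 halt
      have hbla : PySem.List.bisectLeft ts (ti + d) ≤ a := by
        by_contra hgt
        have := hlt a halt (by omega)
        rw [hgetc] at hcond; omega
      have hj : max (PySem.List.bisectLeft ts (ti + d)) a = a := by omega
      rw [if_pos hcond]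
      simp only [hj, halt, if_pos]
    · have hgetc : ts.getD a 0 = ts[a] := List.getD_eq_getElem ts 0 halt
      have hbla : a < PySem.List.bisectLeft ts (ti + d) := by
        by_contra hle
        have := hge a halt (by omega)
        rw [hgetc] at hcond; omega
      rw [if_neg hcond]
      have hcast : ((a : Int) + 1) = ((a + 1 : Nat) : Int) := by push_cast; ring
      rw [hcast, ih (a + 1) (by omega) (by omega)]
      have hmax : max (PySem.List.bisectLeft ts (ti + d)) (a + 1)
           = max (PySem.List.bisectLeft ts (ti + d)) a := by omega
      simp only [hmax]

-- the two loop bodies agree on in-range indices of the sorted list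
theorem pvStep_eq (ts : List Int) (hs : ts.Pairwise (· ≤ ·)) (d stt : Int)
    (st : Int × Int × Option Int) (k : Nat) (hk : k < ts.length) :
    pvStepA ts d stt st (k : Int) = pvStepB ts d stt st k := by
  unfold pvStepA pvStepB
  rw [PySem.List.pyGetD_natCast]
  by_cases hskip : ts.getD k 0 < stt
  · rw [if_pos hskip, if_pos hskip]
  · rw [if_neg hskip, if_neg hskip]
    have hcast : ((k : Int) + 1) = ((k + 1 : Nat) : Int) := by push_cast; ring
    rw [hcast, pvLoopJ_eq_bisect ts hs d (ts.getD k 0) st (k + 1) (by omega)]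

-- the two outer loops compute the same final state
theorem pvFold_eq (ts : List Int) (hs : ts.Pairwise (· ≤ ·)) (d stt : Int) :
    (PySem.List.pyRange 0 ((ts.length : Int) - 1) 1).foldl (pvStepA ts d stt) (0, 0, none) =
    (List.range (ts.length - 1)).foldl (pvStepB ts d stt) (0, 0, none) := by
  rw [PySem.List.pyRange_one]
  have hto : (((ts.length : Int) - 1) - 0).toNat = ts.length - 1 := by omega
  rw [hto, List.foldl_map]
  refine PySem.List.foldl_congr_mem _ _ _ _ ?_
  intro st k hk
  have hk' : k < ts.length - 1 := List.mem_range.mp hk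
  have h0 : (0 : Int) + (k : Int) = (k : Int) := by ring
  rw [h0]
  exact pvStep_eq ts hs d stt st k (by omega)

-- ===== VERDICT (by name: the statement is the Claim_ definition above) =====
theorem closest_duration_spec : Claim_equal_closest_duration := by
  intro timestamps assumedDuration startTime _
  unfold Spec_closest_duration closest_duration closest_duration_alt
  by_cases hlen : timestamps.length < 2
  · have h1 : (timestamps.isEmpty || decide (timestamps.length < 2)) = true := by
      simp [hlen]
    rw [h1, if_pos rfl, if_pos hlen]
  · have h1 : (timestamps.isEmpty || decide (timestamps.length < 2)) = false := by
      rcases timestamps with _ | _ <;> simp_all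
    rw [h1, if_neg (by simp), if_neg hlen]
    have hs : (PySem.List.sorted timestamps (fun x => x) false).Pairwise (· ≤ ·) :=
      PySem.List.sorted_pairwise timestamps (fun x => x)
    simp only [PySem.List.pyGetD_zero, pvFold_eq _ hs]
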